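-- pv_equiv track=rewrite | github.com/MaxAg22/sim-models | num_methods/von_neuman_generator.py | get_von_neuman_seq
-- ===== SOURCE A (Python) =====
-- def von_neumann(d):
--     """von Neuman generator"""
--     d = (d**2 // 100) % 10000
--     return d
--
-- def get_von_neuman_seq(u,n_sim):
--     """generates a von neuman seq"""
--     k = 0
--     pos = 0
--     period = False
--     seq = [u]
--
--     for _ in range(n_sim):
--         u = von_neumann(u)
--         if not period and u in seq:
--             pos = seq.index(u)
--             k = len(seq) - pos
--             period = True
--         seq.append(u)
--
--     return (seq, k, pos)
-- ===== SOURCE B (Python) =====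
-- def von_neumann(d):
--     """von Neuman generator"""
--     return (d**2 // 100) % 10000
--
--
-- def get_von_neuman_seq(u, n_sim):
--     """generates a von neuman seq: first build the whole sequence, then scan for the first repeat"""
--     # phase 1: generate the complete sequence
--     seq = [u]
--     for _ in range(n_sim):
--         u = von_neumann(u)
--         seq.append(u)
--     # phase 2: find the first index whose value already occurred earlier
--     k = 0
--     pos = 0
--     for j in range(1, len(seq)):
--         prev = seq[:j]
--         if seq[j] in prev:
--             pos = prev.index(seq[j])
--             k = j - pos
--             break
--     return (seq, k, pos)
-- ===== Notes on version B (the rewrite author's own statement) =====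
-- stated objective: alternative
-- what changed: A interleaves cycle detection with generation (membership test + list.index inside the generating loop guarded by a 'period' flag); B first generates the whole sequence in one loop, then a separate scan over indices finds the first element that occurred earlier and derives (k, pos) from its index.
import Mathlib
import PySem

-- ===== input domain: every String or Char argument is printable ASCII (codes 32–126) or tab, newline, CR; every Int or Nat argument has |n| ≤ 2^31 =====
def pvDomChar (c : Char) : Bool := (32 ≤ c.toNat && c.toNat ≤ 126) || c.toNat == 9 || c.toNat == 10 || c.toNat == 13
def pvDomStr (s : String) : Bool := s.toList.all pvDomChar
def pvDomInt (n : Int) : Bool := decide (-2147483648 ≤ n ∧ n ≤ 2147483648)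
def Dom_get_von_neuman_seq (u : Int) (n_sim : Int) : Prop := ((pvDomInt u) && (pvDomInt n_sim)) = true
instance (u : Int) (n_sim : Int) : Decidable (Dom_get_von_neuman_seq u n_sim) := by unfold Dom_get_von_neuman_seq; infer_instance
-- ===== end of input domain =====

-- B restructures A: A interleaves cycle detection with generation; B first builds
-- the whole sequence, then a separate scan finds the first repeated value (objective: alternative).

-- ===== PORT A =====
def von_neumann (d : Int) : Int :=
  PySem.Int.mod (PySem.Int.floordiv (d ^ 2) 100) 10000

-- state: (u, k, pos, period, seq)
def get_von_neuman_seq (u : Int) (n_sim : Int) : List Int × Int × Int :=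
  let s := (PySem.List.pyRange 0 n_sim 1).foldl
    (fun (st : Int × Int × Int × Bool × List Int) _ =>
      match st with
      | (u, k, pos, period, seq) =>
        let u := von_neumann u
        if period = false ∧ u ∈ seq then
          let pos : Int := ((PySem.List.index? seq u).getD 0 : Nat)
          ((u, (seq.length : Int) - pos, pos, true, seq ++ [u]))
        else (u, k, pos, period, seq ++ [u]))
    (u, 0, 0, false, [u])
  (s.2.2.2.2, s.2.1, s.2.2.1)

-- ===== PORT B =====
def von_neumann_alt (d : Int) : Int :=
  PySem.Int.mod (PySem.Int.floordiv (d ^ 2) 100) 10000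

-- phase 2 of B: scan j = 1, 2, … for the first value that already occurred (break = return)
def detect_alt (seq : List Int) (j : Nat) : Int × Int :=
  if h : j < seq.length then
    let prev := seq.take j
    let x := PySem.List.pyGetD seq (j : Int) 0
    if x ∈ prev then
      let pos : Int := ((PySem.List.index? prev x).getD 0 : Nat)
      ((j : Int) - pos, pos)
    else detect_alt seq (j + 1)
  else (0, 0)
termination_by seq.length - j

def get_von_neuman_seq_alt (u : Int) (n_sim : Int) : List Int × Int × Int :=
  -- phase 1: generate the complete sequence
  let g := (PySem.List.pyRange 0 n_sim 1).foldl
    (fun (st : Int × List Int) _ =>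
      let u := von_neumann_alt st.1
      (u, st.2 ++ [u]))
    (u, [u])
  -- phase 2: find the first index whose value already occurred earlier
  let r := detect_alt g.2 1
  (g.2, r.1, r.2)

-- ===== PRECONDITION & SPEC =====
def Spec_get_von_neuman_seq (u : Int) (n_sim : Int) (out : List Int × Int × Int) : Prop := out = get_von_neuman_seq_alt u n_sim
instance (u : Int) (n_sim : Int) (out : List Int × Int × Int) : Decidable (Spec_get_von_neuman_seq u n_sim out) := by unfold Spec_get_von_neuman_seq; infer_instance

-- ===== CLAIM (what is proved, stated in full; the proofs are below) =====
def Claim_equal_get_von_neuman_seq : Prop := ∀ (u : Int) (n_sim : Int), Dom_get_von_neuman_seq u n_sim → Spec_get_von_neuman_seq u n_sim (get_von_neuman_seq u n_sim)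

-- ===== LEMMAS AND PROOFS =====

-- the two loop bodies as named step functions
def pvStepA (st : Int × Int × Int × Bool × List Int) : Int × Int × Int × Bool × List Int :=
  match st with
  | (u, k, pos, period, seq) =>
    let u := von_neumann u
    if period = false ∧ u ∈ seq then
      let pos : Int := ((PySem.List.index? seq u).getD 0 : Nat)
      ((u, (seq.length : Int) - pos, pos, true, seq ++ [u]))
    else (u, k, pos, period, seq ++ [u])

def pvStepB (st : Int × List Int) : Int × List Int :=
  let u := von_neumann_alt st.1
  (u, st.2 ++ [u])

theorem foldl_ignore {σ : Type} {α : Type} (g : σ → σ) :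
    ∀ (l : List α) (init : σ), l.foldl (fun s _ => g s) init = g^[l.length] init := by
  intro l
  induction l with
  | nil => intro init; rfl
  | cons a t ih =>
      intro init
      simp [List.foldl, ih, Function.iterate_succ_apply]

-- nodup prefix: the j-th element does not occur before index j
theorem nodup_not_mem_take (seq : List Int) (h : seq.Nodup) (j : Nat) (hj : j < seq.length) :
    seq[j] ∉ seq.take j := by
  intro hmem
  rw [List.mem_take_iff_getElem] at hmem
  obtain ⟨i, hi, hval⟩ := hmem
  rw [List.nodup_iff_getElem?_ne_getElem?] at h
  exact h i j (by omega) hj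
    (by rw [List.getElem?_eq_getElem (by omega), List.getElem?_eq_getElem hj, hval])

-- a non-nodup list has an index whose value occurs earlier
theorem exists_dup_index (seq : List Int) (h : ¬ seq.Nodup) :
    ∃ j, 1 ≤ j ∧ ∃ hj : j < seq.length, seq[j] ∈ seq.take j := by
  rw [List.nodup_iff_getElem?_ne_getElem?] at h
  push Not at h
  obtain ⟨i, j, hij, hjl, heq⟩ := h
  refine ⟨j, by omega, hjl, ?_⟩
  rw [List.mem_take_iff_getElem]
  refine ⟨i, by omega, ?_⟩
  have h1 : seq[i]? = some seq[i] := List.getElem?_eq_getElem (by omega)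
  have h2 : seq[j]? = some seq[j] := List.getElem?_eq_getElem hjl
  rw [h1, h2] at heq
  exact Option.some_injective _ heq

theorem detect_nodup (seq : List Int) (h : seq.Nodup) :
    ∀ (k j : Nat), seq.length ≤ j + k → detect_alt seq j = (0, 0) := by
  intro k
  induction k with
  | zero =>
      intro j hj
      unfold detect_alt
      rw [dif_neg (by omega)]
  | succ k ih =>
      intro j hj
      unfold detect_alt
      by_cases hlt : j < seq.length
      · rw [dif_pos hlt]
        have hget : PySem.List.pyGetD seq (j : Int) 0 = seq[j] := by
          simp [PySem.List.pyGetD_natCast, List.getD_eq_getElem?_getD, List.getElem?_eq_getElem hlt]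
        rw [if_neg (by rw [hget]; exact nodup_not_mem_take seq h j hlt)]
        exact ih (j + 1) (by omega)
      · rw [dif_neg hlt]

-- appending to a nodup sequence: the scan finds the new element (or nothing)
theorem detect_append_nodup (seq : List Int) (x : Int) (h : seq.Nodup) :
    ∀ (k j : Nat), 1 ≤ j → j + k = seq.length →
      detect_alt (seq ++ [x]) j =
        if x ∈ seq then
          ((seq.length : Int) - ((PySem.List.index? seq x).getD 0 : Nat),
           (((PySem.List.index? seq x).getD 0 : Nat) : Int))
        else (0, 0) := by
  intro k
  induction k with
  | zero =>
      intro j hj1 hj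
      have hjlen : j = seq.length := by omega
      subst hjlen
      unfold detect_alt
      rw [dif_pos (by simp)]
      have hprev : (seq ++ [x]).take seq.length = seq := by
        simp
      have hget : PySem.List.pyGetD (seq ++ [x]) (seq.length : Int) 0 = x := by
        simp [PySem.List.pyGetD_natCast, List.getD_eq_getElem?_getD]
      rw [hprev, hget]
      by_cases hx : x ∈ seq
      · rw [if_pos hx, if_pos hx]
      · rw [if_neg hx, if_neg hx]
        unfold detect_alt
        rw [dif_neg (by simp)]
  | succ k ih =>
      intro j hj1 hj
      have hlt : j < seq.length := by omega
      unfold detect_alt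
      rw [dif_pos (by simp; omega)]
      have hprev : (seq ++ [x]).take j = seq.take j := List.take_append_of_le_length (by omega)
      have hget : PySem.List.pyGetD (seq ++ [x]) (j : Int) 0 = seq[j] := by
        simp [PySem.List.pyGetD_natCast, List.getD_eq_getElem?_getD,
              List.getElem?_append_left hlt, List.getElem?_eq_getElem hlt]
      rw [hprev, hget, if_neg (nodup_not_mem_take seq h j hlt)]
      exact ih (j + 1) (by omega) (by omega)

-- appending past an existing duplicate does not change the scan's result
theorem detect_append_dup (seq : List Int) (x : Int) :
    ∀ (k j : Nat), j + k = seq.length →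
      (∃ i, j ≤ i ∧ ∃ hi : i < seq.length, seq[i] ∈ seq.take i) →
      detect_alt (seq ++ [x]) j = detect_alt seq j := by
  intro k
  induction k with
  | zero =>
      intro j hj ⟨i, hji, hi, _⟩
      omega
  | succ k ih =>
      intro j hj ⟨i, hji, hi, hmem⟩
      have hlt : j < seq.length := by omega
      conv_lhs => unfold detect_alt
      conv_rhs => unfold detect_alt
      rw [dif_pos (by simp; omega), dif_pos hlt]
      have hprev : (seq ++ [x]).take j = seq.take j := List.take_append_of_le_length (by omega)
      have hget : PySem.List.pyGetD (seq ++ [x]) (j : Int) 0 = seq[j] := by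
        simp [PySem.List.pyGetD_natCast, List.getD_eq_getElem?_getD,
              List.getElem?_append_left hlt, List.getElem?_eq_getElem hlt]
      have hget2 : PySem.List.pyGetD seq (j : Int) 0 = seq[j] := by
        simp [PySem.List.pyGetD_natCast, List.getD_eq_getElem?_getD, List.getElem?_eq_getElem hlt]
      rw [hprev, hget, hget2]
      by_cases hin : seq[j] ∈ seq.take j
      · rw [if_pos hin, if_pos hin]
      · rw [if_neg hin, if_neg hin]
        refine ih (j + 1) (by omega) ⟨i, ?_, hi, hmem⟩
        rcases Nat.lt_or_ge j i with h' | h'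
        · omega
        · exfalso
          have : i = j := by omega
          subst this
          exact hin hmem

-- the invariant tying A's loop state to B's generation state
def pvInv (sA : Int × Int × Int × Bool × List Int) (sB : Int × List Int) : Prop :=
  sA.1 = sB.1 ∧ sA.2.2.2.2 = sB.2 ∧ sB.2 ≠ [] ∧
  (sA.2.2.2.1 = true ↔ ¬ sB.2.Nodup) ∧
  (sA.2.1, sA.2.2.1) = detect_alt sB.2 1

theorem pvInv_step (sA : Int × Int × Int × Bool × List Int) (sB : Int × List Int)
    (h : pvInv sA sB) : pvInv (pvStepA sA) (pvStepB sB) := by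
  obtain ⟨u, k, pos, period, seq⟩ := sA
  obtain ⟨u', seq'⟩ := sB
  obtain ⟨hu, hseq, hne, hper, hkp⟩ := h
  simp only at hu hseq hne hper hkp
  subst hu hseq
  have hlen : 0 < seq.length := List.length_pos_iff.mpr hne
  simp only [pvStepA, pvStepB, von_neumann, von_neumann_alt]
  set x := PySem.Int.mod (PySem.Int.floordiv (u ^ 2) 100) 10000 with hx
  by_cases hp : period = false ∧ x ∈ seq
  · -- A records the period now: seq was nodup, x repeats
    obtain ⟨hp0, hpx⟩ := hp
    subst hp0
    have hnd : seq.Nodup := by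
      by_contra hc
      exact absurd (hper.mpr hc) (by simp)
    rw [if_pos ⟨rfl, hpx⟩]
    refine ⟨rfl, rfl, by simp, ?_, ?_⟩
    · have hnd' : ¬ (seq ++ [x]).Nodup := by
        intro hc
        exact (List.disjoint_of_nodup_append hc) hpx (by simp)
      simp [hnd']
    · have h1 := detect_append_nodup seq x hnd (seq.length - 1) 1 le_rfl (by omega)
      simp only at h1
      rw [h1, if_pos hpx]
  · rw [if_neg hp]
    by_cases hper' : period = true
    · -- period already found: duplicate already inside seq
      subst hper'
      have hdup : ¬ seq.Nodup := hper.mp rfl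
      obtain ⟨j, hj1, hj, hmem⟩ := exists_dup_index seq hdup
      refine ⟨rfl, rfl, by simp, ?_, ?_⟩
      · have hnd' : ¬ (seq ++ [x]).Nodup := by
          intro hc
          exact hdup (List.Nodup.of_append_left hc)
        simp [hnd']
      · rw [detect_append_dup seq x (seq.length - 1) 1 (by omega) ⟨j, hj1, hj, hmem⟩]
        exact hkp
    · -- no period yet and x is new: the scan still finds nothing
      have hp0 : period = false := by cases period <;> simp_all
      subst hp0
      have hnd : seq.Nodup := by
        by_contra hc
        exact absurd (hper.mpr hc) (by simp)
      have hxn : x ∉ seq := fun hc => hp ⟨rfl, hc⟩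
      refine ⟨rfl, rfl, by simp, ?_, ?_⟩
      · have hnd' : (seq ++ [x]).Nodup := by
          refine List.Nodup.append hnd (by simp) ?_
          intro a ha hax
          rw [List.mem_singleton] at hax
          exact hxn (hax ▸ ha)
        simp [hnd']
      · have h1 := detect_append_nodup seq x hnd (seq.length - 1) 1 le_rfl (by omega)
        simp only at h1
        rw [h1, if_neg hxn, hkp, detect_nodup seq hnd seq.length 1 (by omega)]

theorem pvInv_iterate (u : Int) : ∀ m : Nat,
    pvInv (pvStepA^[m] (u, 0, 0, false, [u])) (pvStepB^[m] (u, [u])) := by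
  intro m
  induction m with
  | zero =>
      refine ⟨rfl, rfl, by simp, by simp, ?_⟩
      show ((0 : Int), (0 : Int)) = detect_alt [u] 1
      unfold detect_alt
      rw [dif_neg (by simp)]
  | succ m ih =>
      rw [Function.iterate_succ_apply', Function.iterate_succ_apply']
      exact pvInv_step _ _ ih

-- ===== VERDICT (by name: the statement is the Claim_ definition above) =====
theorem get_von_neuman_seq_spec : Claim_equal_get_von_neuman_seq := by
  intro u n_sim _
  unfold Spec_get_von_neuman_seq get_von_neuman_seq get_von_neuman_seq_alt
  have hA : ((PySem.List.pyRange 0 n_sim 1).foldl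
      (fun (st : Int × Int × Int × Bool × List Int) _ =>
        match st with
        | (u, k, pos, period, seq) =>
          let u := von_neumann u
          if period = false ∧ u ∈ seq then
            let pos : Int := ((PySem.List.index? seq u).getD 0 : Nat)
            ((u, (seq.length : Int) - pos, pos, true, seq ++ [u]))
          else (u, k, pos, period, seq ++ [u]))
      (u, 0, 0, false, [u])) = pvStepA^[(PySem.List.pyRange 0 n_sim 1).length] (u, 0, 0, false, [u]) :=
    foldl_ignore pvStepA _ _
  have hB : ((PySem.List.pyRange 0 n_sim 1).foldl
      (fun (st : Int × List Int) _ =>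
        let u := von_neumann_alt st.1
        (u, st.2 ++ [u]))
      (u, [u])) = pvStepB^[(PySem.List.pyRange 0 n_sim 1).length] (u, [u]) :=
    foldl_ignore pvStepB _ _
  simp only [hA, hB]
  obtain ⟨_, h2, _, _, h4⟩ := pvInv_iterate u (PySem.List.pyRange 0 n_sim 1).length
  refine Prod.ext h2 ?_
  simp only [← h2]
  have := congrArg Prod.fst h4
  have := congrArg Prod.snd h4
  simp_all
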